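-- pv_equiv track=rewrite | github.com/alixtc/pythonProject | collatz.py | strsearch
-- ===== SOURCE A (Python) =====
-- def strsearch(stri):
--     counter = 0
--     streak = 0
--     curr_val = stri[0]
--     for i in range(1, len(stri)):
--         if stri[i] == curr_val:
--             counter += 1
--         else:
--             curr_val = stri[i]
--             counter = 0
--
--         if counter == 6:
--             streak += 1
--             counter = 0
--     return streak
-- ===== SOURCE B (Python) =====
-- def strsearch(stri):
--     n = len(stri)
--     bounds = [0] + [i for i in range(1, n) if stri[i] != stri[i - 1]] + [n]
--     return sum((q - p - 1) // 6 for p, q in zip(bounds, bounds[1:]))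
-- ===== Notes on version B (the rewrite author's own statement) =====
-- stated objective: alternative
-- what changed: B is stateless and staged: it first materializes the list of run boundaries (indices where the character changes) with a comprehension, then sums (q-p-1)//6 over consecutive boundary pairs via zip, instead of A's single stateful scan with a resetting streak counter.
import Mathlib
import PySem

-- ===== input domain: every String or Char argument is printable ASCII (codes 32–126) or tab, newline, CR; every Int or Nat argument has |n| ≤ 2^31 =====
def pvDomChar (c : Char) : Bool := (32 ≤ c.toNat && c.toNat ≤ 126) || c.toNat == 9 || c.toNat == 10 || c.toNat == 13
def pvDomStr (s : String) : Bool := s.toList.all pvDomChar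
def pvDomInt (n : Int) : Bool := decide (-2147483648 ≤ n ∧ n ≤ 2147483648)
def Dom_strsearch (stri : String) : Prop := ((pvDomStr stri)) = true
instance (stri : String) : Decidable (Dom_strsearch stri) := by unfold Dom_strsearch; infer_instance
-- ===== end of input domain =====

-- B is stateless and staged: it materializes the list of run-boundary indices, then sums (q-p-1)//6 over consecutive boundary pairs; same cost, different algorithmic decomposition.

-- ===== PORT A =====
-- A's for-loop over i in range(1, len), carrying (curr_val, counter, streak); branch order as in A.
def strsearchLoopA : List Char → Char → Int → Int → Int
  | [], _, _, streak => streak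
  | c :: rest, curr_val, counter, streak =>
    let p : Char × Int := if c = curr_val then (curr_val, counter + 1) else (c, 0)
    if p.2 = 6 then strsearchLoopA rest p.1 0 (streak + 1)
    else strsearchLoopA rest p.1 p.2 streak

def strsearch (stri : String) : Int :=
  match stri.toList with
  | [] => 0          -- stri[0] raises IndexError in Python; excluded by Pre_strsearch
  | c :: rest => strsearchLoopA rest c 0 0

-- ===== PORT B =====
-- bounds = [0] + [i for i in range(1,n) if stri[i] != stri[i-1]] + [n]; then sum over zip(bounds, bounds[1:])
def strsearch_alt (stri : String) : Int :=
  let lt := stri.toList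
  let n : Int := lt.length
  let bounds : List Int :=
    0 :: ((PySem.List.pyRange 1 n 1).filter
        (fun i => PySem.List.pyGet? lt i != PySem.List.pyGet? lt (i - 1)) ++ [n])
  (bounds.zip bounds.tail).foldl
    (fun acc pq => acc + PySem.Int.floordiv (pq.2 - pq.1 - 1) 6) 0

-- ===== PRECONDITION & SPEC =====
-- Pre_ excludes only the empty string, on which A raises IndexError at stri[0].
def Pre_strsearch (stri : String) : Prop := stri.toList ≠ []
instance (stri : String) : Decidable (Pre_strsearch stri) := by unfold Pre_strsearch; infer_instance
def pvWitness_strsearch : String := "aaaaaaab"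

def Spec_strsearch (stri : String) (out : Int) : Prop := out = strsearch_alt stri
instance (stri : String) (out : Int) : Decidable (Spec_strsearch stri out) := by unfold Spec_strsearch; infer_instance

-- ===== CLAIM (what is proved, stated in full; the proofs are below) =====
def Claim_equal_strsearch : Prop := ∀ (stri : String), Dom_strsearch stri → Pre_strsearch stri → Spec_strsearch stri (strsearch stri)

-- ===== LEMMAS AND PROOFS =====

-- Proof-side bridge: a stateful run-length loop (used only in the proofs, by neither port).
def pvLoopB : List Char → Char → Int → Int → Int
  | [], _, run, total => total + PySem.Int.floordiv (run - 1) 6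
  | c :: rest, prev, run, total =>
    if c = prev then pvLoopB rest prev (run + 1) total
    else pvLoopB rest c 1 (total + PySem.Int.floordiv (run - 1) 6)

theorem pvLoopB_affine (l : List Char) : ∀ (p : Char) (r t : Int),
    pvLoopB l p r t = t + pvLoopB l p r 0 := by
  induction l with
  | nil => intro p r t; simp [pvLoopB]
  | cons c rest ih =>
    intro p r t
    simp only [pvLoopB]
    by_cases h : c = p
    · rw [if_pos h, if_pos h]
      exact ih p (r + 1) t
    · rw [if_neg h, if_neg h]
      rw [ih c 1 (t + _), ih c 1 (0 + _)]
      ring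

-- Invariant: with r = run - 1 increments so far in the current run (r ≥ 0),
-- A carries counter = r % 6 and streak = t + r / 6, where t is the total over completed runs.
theorem loopA_eq_loopB (l : List Char) : ∀ (c : Char) (r t : Int), 0 ≤ r →
    strsearchLoopA l c (r % 6) (t + r / 6) = pvLoopB l c (r + 1) t := by
  induction l with
  | nil =>
    intro c r t hr
    simp only [strsearchLoopA, pvLoopB]
    rw [PySem.Int.floordiv_eq_ediv_of_pos (by norm_num), show r + 1 - 1 = r by ring]
  | cons x xs ih =>
    intro c r t hr
    simp only [strsearchLoopA, pvLoopB]
    by_cases hx : x = c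
    · simp only [hx]
      by_cases h6 : r % 6 + 1 = 6
      · rw [if_pos (by simpa using h6)]
        have h1 : (0 : Int) = (r + 1) % 6 := by omega
        have h2 : t + r / 6 + 1 = t + (r + 1) / 6 := by omega
        rw [h1, h2, show r + 1 + 1 = (r + 1) + 1 by ring]
        exact ih c (r + 1) t (by omega)
      · rw [if_neg (by simpa using h6)]
        have h1 : r % 6 + 1 = (r + 1) % 6 := by omega
        have h2 : r / 6 = (r + 1) / 6 := by omega
        rw [h1, h2, show r + 1 + 1 = (r + 1) + 1 by ring]
        exact ih c (r + 1) t (by omega)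
    · simp only [if_neg hx]
      rw [if_neg (by norm_num)]
      have hb : t + PySem.Int.floordiv (r + 1 - 1) 6 = t + r / 6 := by
        rw [PySem.Int.floordiv_eq_ediv_of_pos (by norm_num), show r + 1 - 1 = r by ring]
      rw [hb]
      simpa using ih x 0 (t + r / 6) le_rfl

-- Sum of floordiv(q-p-1,6) over consecutive pairs of a boundary list.
def pvPairSum : List Int → Int
  | p :: q :: rest => PySem.Int.floordiv (q - p - 1) 6 + pvPairSum (q :: rest)
  | _ => 0

theorem foldZip_eq_pairSum (bs : List Int) : ∀ (t : Int),
    (bs.zip bs.tail).foldl (fun acc pq => acc + PySem.Int.floordiv (pq.2 - pq.1 - 1) 6) t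
      = t + pvPairSum bs := by
  induction bs with
  | nil => intro t; simp [pvPairSum]
  | cons p rest ih =>
    intro t
    cases rest with
    | nil => simp [pvPairSum]
    | cons q rest' =>
      simp only [List.tail_cons, List.zip_cons_cons, List.foldl_cons, pvPairSum]
      simp only [List.tail_cons] at ih
      rw [ih]
      ring

-- Recursive characterization of the change-point indices (relative to the list head).
def pvCuts : List Char → List Int
  | a :: b :: t => (if b = a then [] else [1]) ++ (pvCuts (b :: t)).map (· + 1)
  | _ => []

theorem pyGet?_cons_of_one_le (a : Char) (l : List Char) (i : Int) (h : 1 ≤ i) :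
    PySem.List.pyGet? (a :: l) i = PySem.List.pyGet? l (i - 1) := by
  rw [PySem.List.pyGet?_of_nonneg _ (by omega), PySem.List.pyGet?_of_nonneg _ (by omega)]
  have : i.toNat = (i - 1).toNat + 1 := by omega
  rw [this]
  simp

theorem filter_eq_cuts (l : List Char) :
    (PySem.List.pyRange 1 (l.length : Int) 1).filter
        (fun i => PySem.List.pyGet? l i != PySem.List.pyGet? l (i - 1)) = pvCuts l := by
  induction l with
  | nil => simp [pvCuts, PySem.List.pyRange_one_eq_nil]
  | cons a t ih =>
    cases t with
    | nil => simp [pvCuts, PySem.List.pyRange_one_eq_nil]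
    | cons b t' =>
      have hn : (1 : Int) < ((a :: b :: t').length : Int) := by
        simp only [List.length_cons]; push_cast; omega
      rw [PySem.List.pyRange_one_cons hn]
      have hshift : PySem.List.pyRange (1 + 1) ((a :: b :: t').length : Int) 1
          = (PySem.List.pyRange 1 (((b :: t').length : Int)) 1).map (· + 1) := by
        rw [PySem.List.pyRange_one, PySem.List.pyRange_one, List.map_map]
        have he : (((a :: b :: t').length : Int) - (1 + 1)).toNat = (((b :: t').length : Int) - 1).toNat := by
          simp; omega
        rw [he]
        exact List.map_congr_left (fun k _ => by simp [Function.comp]; ring)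
      rw [List.filter_cons, hshift, List.filter_map]
      have hhead : (PySem.List.pyGet? (a :: b :: t') 1 != PySem.List.pyGet? (a :: b :: t') (1 - 1)) = !(b == a) := by
        rw [PySem.List.pyGet?_of_nonneg _ (by norm_num), PySem.List.pyGet?_of_nonneg _ (by norm_num)]
        norm_num [bne]
      have hfil : ((PySem.List.pyRange 1 (((b :: t').length : Int)) 1).filter
            ((fun i => PySem.List.pyGet? (a :: b :: t') i != PySem.List.pyGet? (a :: b :: t') (i - 1)) ∘ (· + 1)))
          = (PySem.List.pyRange 1 (((b :: t').length : Int)) 1).filter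
            (fun i => PySem.List.pyGet? (b :: t') i != PySem.List.pyGet? (b :: t') (i - 1)) := by
        apply List.filter_congr
        intro i hi
        have h1 : 1 ≤ i := (PySem.List.mem_pyRange_one.mp hi).1
        simp only [Function.comp]
        rw [pyGet?_cons_of_one_le a _ (i + 1) (by omega),
            pyGet?_cons_of_one_le a _ (i + 1 - 1) (by omega)]
        norm_num
      rw [hfil, ih, pvCuts, hhead]
      by_cases hba : b = a <;> simp [hba]

-- Main invariant: boundaries shifted by k after a first boundary b give the run-length loop.
theorem pairSum_eq_loopB (t : List Char) : ∀ (d : Char) (b k : Int),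
    pvPairSum (b :: ((pvCuts (d :: t)).map (· + k) ++ [k + ((t.length : Int) + 1)]))
      = pvLoopB t d (k - b + 1) 0 := by
  induction t with
  | nil =>
    intro d b k
    simp only [pvCuts, List.map_nil, List.nil_append, pvPairSum, pvLoopB]
    norm_num
    congr 1
    ring
  | cons e t' ih =>
    intro d b k
    have hcast : ((e :: t').length : Int) + 1 = ((t'.length : Int) + 1) + 1 := by simp
    by_cases hed : e = d
    · have hc : (pvCuts (d :: e :: t')).map (· + k)
          = (pvCuts (e :: t')).map (· + (k + 1)) := by
        simp only [pvCuts, if_pos hed, List.nil_append, List.map_map]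
        exact List.map_congr_left (fun x _ => by simp [Function.comp]; ring)
      rw [hc]
      have harg : k + (((e :: t').length : Int) + 1) = (k + 1) + ((t'.length : Int) + 1) := by
        rw [hcast]; ring
      rw [harg, ih e b (k + 1)]
      simp only [pvLoopB, if_pos hed]
      congr 1
      ring
    · have hc : (pvCuts (d :: e :: t')).map (· + k)
          = (1 + k) :: (pvCuts (e :: t')).map (· + (k + 1)) := by
        simp only [pvCuts, if_neg hed, List.cons_append, List.nil_append, List.map_cons, List.map_map]
        congr 1
        exact List.map_congr_left (fun x _ => by simp [Function.comp]; ring)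
      rw [hc]
      simp only [List.cons_append, pvPairSum]
      have harg : k + (((e :: t').length : Int) + 1) = (k + 1) + ((t'.length : Int) + 1) := by
        rw [hcast]; ring
      rw [harg, ih e (1 + k) (k + 1)]
      have h1 : k + 1 - (1 + k) + 1 = (1 : Int) := by ring
      rw [h1]
      simp only [pvLoopB, if_neg hed]
      rw [pvLoopB_affine t' e 1 (0 + PySem.Int.floordiv (k - b + 1 - 1) 6)]
      have h2 : 1 + k - b - 1 = k - b + 1 - 1 := by ring
      rw [h2]
      ring

-- ===== VERDICT (by name: the statement is the Claim_ definition above) =====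
theorem strsearch_spec : Claim_equal_strsearch := by
  intro stri _ hpre
  unfold Spec_strsearch strsearch strsearch_alt
  cases h : stri.toList with
  | nil => exact absurd h hpre
  | cons c rest =>
    simp only
    rw [foldZip_eq_pairSum, filter_eq_cuts]
    have hmap : pvCuts (c :: rest) = (pvCuts (c :: rest)).map (· + 0) := by simp
    have hlen : ((c :: rest).length : Int) = 0 + ((rest.length : Int) + 1) := by simp
    rw [hmap, hlen, pairSum_eq_loopB rest c 0 0]
    have := loopA_eq_loopB rest c 0 0 le_rfl
    simpa using this
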